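-- pv_equiv track=rewrite | github.com/Coda-Research-Group/LearnedMetricIndex | search/attribtue_filtering/default_filtering.py | path_children_from_categories
-- ===== SOURCE A (Python) =====
-- def path_children_from_categories(path, categories):
--     """
--     Create new tuples by iterating over items in each element of the categories array,
--     and replace the first occurrence of -1 in the 'path' tuple with the iterated item.
--
--     Parameters:
--     path (tuple): A tuple containing one or more elements, one of which may be -1 to be replaced.
--     categories (array-like): An array or list of lists, where each inner list contains items to replace the -1 in the path.
--
--     Returns:
--     list of lists: A list containing lists of tuples, where each tuple is a version of the original path
--                    with the first occurrence of -1 replaced by one of the items from the corresponding element in categories.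
--
--     """
--     result = []
--     for category_list in categories:
--         current_result = []
--         for item in category_list:
--             new_path = []
--             replaced = False
--             for p in path:
--                 if p == -1 and not replaced:
--                     new_path.append(item)
--                     replaced = True
--                 else:
--                     new_path.append(p)
--             current_result.append(tuple(new_path))
--         result.append(current_result)
--     return result
-- ===== SOURCE B (Python) =====
-- def path_children_from_categories(path, categories):
--     try:
--         idx = path.index(-1)
--         prefix = tuple(path[:idx])
--         suffix = tuple(path[idx + 1:])
--         return [[prefix + (item,) + suffix for item in category_list]
--                 for category_list in categories]
--     except ValueError:
--         whole = tuple(path)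
--         return [[whole for _ in category_list] for category_list in categories]
-- ===== Notes on version B (the rewrite author's own statement) =====
-- stated objective: simpler
-- what changed: Finds the index of the first -1 once and builds each child by slice concatenation (prefix + item + suffix), removing the per-item scan-with-flag loop over path.
import Mathlib
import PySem

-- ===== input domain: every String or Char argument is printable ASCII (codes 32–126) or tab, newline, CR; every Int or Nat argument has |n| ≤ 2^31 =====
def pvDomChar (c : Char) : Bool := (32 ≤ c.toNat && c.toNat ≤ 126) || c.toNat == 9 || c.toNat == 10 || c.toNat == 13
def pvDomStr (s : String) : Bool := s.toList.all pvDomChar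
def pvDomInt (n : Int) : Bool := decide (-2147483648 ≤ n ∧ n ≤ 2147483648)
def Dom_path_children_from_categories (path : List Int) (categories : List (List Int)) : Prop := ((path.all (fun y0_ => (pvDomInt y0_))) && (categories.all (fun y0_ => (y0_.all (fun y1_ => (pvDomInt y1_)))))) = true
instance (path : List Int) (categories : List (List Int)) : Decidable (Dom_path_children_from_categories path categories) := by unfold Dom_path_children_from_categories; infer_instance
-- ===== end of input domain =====

-- B replaces A's per-item scan-with-flag loop over path by locating the first -1 once
-- and building each child via slice concatenation (objective: simpler).

-- ===== PORT A =====
-- inner `for p in path` loop of A, with the (new_path, replaced) state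
def pvReplA (path : List Int) (item : Int) : List Int :=
  (path.foldl
    (fun (st : List Int × Bool) p =>
      if p = -1 ∧ st.2 = false then (st.1 ++ [item], true) else (st.1 ++ [p], st.2))
    ([], false)).1

def path_children_from_categories (path : List Int) (categories : List (List Int)) : List (List (List Int)) :=
  categories.foldl
    (fun result category_list =>
      result ++ [category_list.foldl (fun cur item => cur ++ [pvReplA path item]) []])
    []

-- ===== PORT B =====
def path_children_from_categories_alt (path : List Int) (categories : List (List Int)) : List (List (List Int)) :=
  match PySem.List.index? path (-1) with
  | some idx =>
      let pre := path.take idx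
      let suf := path.drop (idx + 1)
      categories.map (fun category_list => category_list.map (fun item => pre ++ item :: suf))
  | none =>
      categories.map (fun category_list => category_list.map (fun _ => path))

-- ===== PRECONDITION & SPEC =====
def Spec_path_children_from_categories (path : List Int) (categories : List (List Int)) (out : List (List (List Int))) : Prop := out = path_children_from_categories_alt path categories
instance (path : List Int) (categories : List (List Int)) (out : List (List (List Int))) : Decidable (Spec_path_children_from_categories path categories out) := by unfold Spec_path_children_from_categories; infer_instance

-- ===== CLAIM (what is proved, stated in full; the proofs are below) =====
def Claim_equal_path_children_from_categories : Prop := ∀ (path : List Int) (categories : List (List Int)), Dom_path_children_from_categories path categories → Spec_path_children_from_categories path categories (path_children_from_categories path categories)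

-- ===== LEMMAS AND PROOFS =====

theorem foldl_snoc {α β : Type} (f : α → β) (l : List α) (acc : List β) :
    l.foldl (fun r x => r ++ [f x]) acc = acc ++ l.map f := by
  induction l generalizing acc with
  | nil => simp
  | cons x xs ih => simp [List.foldl, ih]

-- once replaced = True, A's inner loop just copies the rest of path
theorem loopA_true (path : List Int) (item : Int) (acc : List Int) :
    (path.foldl
      (fun (st : List Int × Bool) p =>
        if p = -1 ∧ st.2 = false then (st.1 ++ [item], true) else (st.1 ++ [p], st.2))
      (acc, true)).1 = acc ++ path := by
  induction path generalizing acc with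
  | nil => simp
  | cons p ps ih => simp [List.foldl, ih]

-- A's inner loop computes the index?-based slice form
theorem loopA_spec (path : List Int) (item : Int) (acc : List Int) :
    (path.foldl
      (fun (st : List Int × Bool) p =>
        if p = -1 ∧ st.2 = false then (st.1 ++ [item], true) else (st.1 ++ [p], st.2))
      (acc, false)).1 =
    acc ++ (match PySem.List.index? path (-1) with
            | some k => path.take k ++ item :: path.drop (k + 1)
            | none => path) := by
  induction path generalizing acc with
  | nil => simp [PySem.List.index?]
  | cons p ps ih =>
    by_cases hp : p = (-1 : Int)
    · subst hp
      rw [PySem.List.index?_cons_self]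
      simp [List.foldl, loopA_true]
    · rw [PySem.List.index?_cons_of_ne ps hp]
      simp only [List.foldl_cons, hp, false_and, if_false]
      rw [ih (acc ++ [p])]
      cases h : PySem.List.index? ps (-1) with
      | none => simp
      | some k => simp [List.take_succ_cons, List.drop_succ_cons]

theorem replA_eq (path : List Int) (item : Int) :
    pvReplA path item =
      match PySem.List.index? path (-1) with
      | some k => path.take k ++ item :: path.drop (k + 1)
      | none => path := by
  unfold pvReplA
  simpa using loopA_spec path item []

theorem portA_as_map (path : List Int) (categories : List (List Int)) :
    path_children_from_categories path categories =
      categories.map (fun cl => cl.map (pvReplA path)) := by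
  unfold path_children_from_categories
  rw [foldl_snoc (fun cl => cl.foldl (fun cur item => cur ++ [pvReplA path item]) []) categories []]
  simp only [List.nil_append]
  apply List.map_congr_left
  intro cl _
  simpa using foldl_snoc (pvReplA path) cl []

-- ===== VERDICT (by name: the statement is the Claim_ definition above) =====
theorem path_children_from_categories_spec : Claim_equal_path_children_from_categories := by
  intro path categories _
  unfold Spec_path_children_from_categories path_children_from_categories_alt
  rw [portA_as_map]
  cases h : PySem.List.index? path (-1) with
  | none => simp only; apply List.map_congr_left; intro cl _;
            apply List.map_congr_left; intro item _; rw [replA_eq, h]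
  | some k => simp only; apply List.map_congr_left; intro cl _;
              apply List.map_congr_left; intro item _; rw [replA_eq, h]
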